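-- pv_equiv track=rewrite | github.com/murtihash94/ssis_migration | ssis_migration/generators/sttm_generator.py | _get_upstream_components
-- ===== SOURCE A (Python) =====
-- from typing import List, Dict, Any, Optional
--
-- def _get_upstream_components(component_id: str, graph: Dict[str, List[str]]) -> List[str]:
--     """Get all upstream components for a given component"""
--     upstream = []
--     visited = set()
--
--     def traverse(comp_id):
--         if comp_id in visited:
--             return
--         visited.add(comp_id)
--
--         if comp_id in graph:
--             for upstream_id in graph[comp_id]:
--                 upstream.append(upstream_id)
--                 traverse(upstream_id)
--
--     traverse(component_id)
--     return upstream
-- ===== SOURCE B (Python) =====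
-- def _get_upstream_components(component_id, graph):
--     """Get all upstream components for a given component"""
--     upstream = []
--     visited = {component_id}
--     stack = [(component_id, iter(graph.get(component_id, [])))]
--     while stack:
--         _node, it = stack[-1]
--         v = next(it, None)
--         if v is None:
--             stack.pop()
--             continue
--         upstream.append(v)
--         if v not in visited:
--             visited.add(v)
--             stack.append((v, iter(graph.get(v, []))))
--     return upstream
-- ===== Notes on version B (the rewrite author's own statement) =====
-- stated objective: idiomatic
-- what changed: Replaces the recursive nested-closure DFS (a local traverse function mutating enclosing upstream/visited) with an iterative loop over an explicit stack of (node, neighbor-iterator) frames, which also avoids Python's recursion limit on deep graphs.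
import Mathlib
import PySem

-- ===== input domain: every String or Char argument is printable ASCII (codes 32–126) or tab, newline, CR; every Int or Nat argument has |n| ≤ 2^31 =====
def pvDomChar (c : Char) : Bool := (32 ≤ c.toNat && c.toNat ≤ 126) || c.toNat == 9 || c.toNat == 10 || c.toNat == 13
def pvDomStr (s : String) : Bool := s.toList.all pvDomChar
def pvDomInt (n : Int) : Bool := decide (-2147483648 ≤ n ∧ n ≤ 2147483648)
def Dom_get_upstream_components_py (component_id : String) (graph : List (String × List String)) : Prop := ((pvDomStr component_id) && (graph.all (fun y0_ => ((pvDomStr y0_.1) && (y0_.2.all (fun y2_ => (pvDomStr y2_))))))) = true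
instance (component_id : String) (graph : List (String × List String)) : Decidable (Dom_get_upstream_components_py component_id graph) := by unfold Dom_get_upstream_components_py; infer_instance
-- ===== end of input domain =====

-- B rewrites A's recursive nested-closure DFS as an iterative loop over an explicit stack of
-- (node, remaining-neighbors) frames (objective: idiomatic, same output for every input).

-- Fuel bounds (totality artifacts only: both traversals terminate, the fuel below is proved sufficient).
def gupAllN (component_id : String) (graph : List (String × List String)) : List String :=
  component_id :: graph.flatMap (fun p => p.1 :: p.2)

def gupMaxLen (graph : List (String × List String)) : Nat :=
  graph.foldr (fun p m => max p.2.length m) 0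

def gupFuelA (component_id : String) (graph : List (String × List String)) : Nat :=
  (gupAllN component_id graph).length * (gupMaxLen graph + 1) + 1

def gupFuelB (component_id : String) (graph : List (String × List String)) : Nat :=
  2 * 3 ^ gupFuelA component_id graph + 3

-- ===== PORT A ===== (recursive `traverse`, mutual with its `for upstream_id in graph[comp_id]` loop)
mutual
def gupGoA : Nat → List (String × List String) → PySem.Set String → List String → String →
    Option (PySem.Set String × List String)
  | 0, _, _, _, _ => none
  | fuel + 1, graph, visited, upstream, comp =>
    if PySem.Set.contains visited comp then some (visited, upstream)   -- if comp_id in visited: return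
    else
      match List.lookup comp graph with                                -- if comp_id in graph:
      | none => some (PySem.Set.add visited comp, upstream)
      | some ns => gupGoL fuel graph (PySem.Set.add visited comp) upstream ns

def gupGoL : Nat → List (String × List String) → PySem.Set String → List String → List String →
    Option (PySem.Set String × List String)
  | 0, _, _, _, _ => none
  | _ + 1, _, visited, upstream, [] => some (visited, upstream)
  | fuel + 1, graph, visited, upstream, v :: rest =>                   -- upstream.append(v); traverse(v)
    match gupGoA fuel graph visited (upstream ++ [v]) v with
    | none => none
    | some (visited', upstream') => gupGoL fuel graph visited' upstream' rest
end

def get_upstream_components_py (component_id : String) (graph : List (String × List String)) : List String :=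
  match gupGoA (gupFuelA component_id graph) graph PySem.Set.empty [] component_id with
  | some (_, upstream) => upstream
  | none => []

-- ===== PORT B ===== (iterative DFS: explicit stack of (node, remaining neighbors) frames)
def gupRunB : Nat → List (String × List String) → List (String × List String) → PySem.Set String →
    List String → Option (List String)
  | 0, _, _, _, _ => none
  | _ + 1, _, [], _, upstream => some upstream                          -- while stack: … else return upstream
  | fuel + 1, graph, (_, []) :: stack, visited, upstream =>             -- iterator exhausted: pop
    gupRunB fuel graph stack visited upstream
  | fuel + 1, graph, (node, v :: rest) :: stack, visited, upstream =>   -- next neighbor v: append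
    if PySem.Set.contains visited v then
      gupRunB fuel graph ((node, rest) :: stack) visited (upstream ++ [v])
    else
      gupRunB fuel graph ((v, (List.lookup v graph).getD []) :: (node, rest) :: stack)
        (PySem.Set.add visited v) (upstream ++ [v])

def get_upstream_components_py_alt (component_id : String) (graph : List (String × List String)) : List String :=
  match gupRunB (gupFuelB component_id graph) graph
      [(component_id, (List.lookup component_id graph).getD [])]
      (PySem.Set.add PySem.Set.empty component_id) [] with
  | some upstream => upstream
  | none => []

-- ===== PRECONDITION & SPEC =====
def Spec_get_upstream_components_py (component_id : String) (graph : List (String × List String)) (out : List String) : Prop := out = get_upstream_components_py_alt component_id graph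
instance (component_id : String) (graph : List (String × List String)) (out : List String) : Decidable (Spec_get_upstream_components_py component_id graph out) := by unfold Spec_get_upstream_components_py; infer_instance

-- ===== CLAIM (what is proved, stated in full; the proofs are below) =====
def Claim_equal_get_upstream_components_py : Prop := ∀ (component_id : String) (graph : List (String × List String)), Dom_get_upstream_components_py component_id graph → Spec_get_upstream_components_py component_id graph (get_upstream_components_py component_id graph)

-- ===== LEMMAS AND PROOFS =====

-- one-step evaluation lemmas for B's loop
theorem gupRunB_pop (f g u st vis up) :
    gupRunB (f + 1) g ((u, []) :: st) vis up = gupRunB f g st vis up := rfl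

theorem gupRunB_vis {vis : PySem.Set String} {v : String} (f g u rest st up)
    (hc : PySem.Set.contains vis v = true) :
    gupRunB (f + 1) g ((u, v :: rest) :: st) vis up
      = gupRunB f g ((u, rest) :: st) vis (up ++ [v]) := by
  have hm : v ∈ vis := (PySem.Set.contains_iff _ _).mp hc
  simp [gupRunB, hm]

theorem gupRunB_new {vis : PySem.Set String} {v : String} (f g u rest st up)
    (hc : PySem.Set.contains vis v = false) :
    gupRunB (f + 1) g ((u, v :: rest) :: st) vis up
      = gupRunB f g ((v, (List.lookup v g).getD []) :: (u, rest) :: st)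
          (PySem.Set.add vis v) (up ++ [v]) := by
  have hm : v ∉ vis := fun hm => by
    rw [(PySem.Set.contains_iff _ _).mpr hm] at hc
    exact Bool.noConfusion hc
  simp [gupRunB, hm]

-- fuel monotonicity
theorem gup_mono (f : Nat) :
    (∀ g vis up c r, gupGoA f g vis up c = some r → gupGoA (f + 1) g vis up c = some r) ∧
    (∀ g vis up ns r, gupGoL f g vis up ns = some r → gupGoL (f + 1) g vis up ns = some r) := by
  induction f with
  | zero =>
    refine ⟨fun g vis up c r h => ?_, fun g vis up ns r h => ?_⟩ <;> simp [gupGoA, gupGoL] at h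
  | succ f ih =>
    refine ⟨fun g vis up c r h => ?_, fun g vis up ns r h => ?_⟩
    · simp only [gupGoA] at h ⊢
      split_ifs at h ⊢ with hc
      · exact h
      · cases hl : List.lookup c g with
        | none => rw [hl] at h; exact h
        | some ns => rw [hl] at h; exact ih.2 _ _ _ _ _ h
    · cases ns with
      | nil => simpa [gupGoL] using h
      | cons v rest =>
        simp only [gupGoL] at h ⊢
        cases ha : gupGoA f g vis (up ++ [v]) v with
        | none => rw [ha] at h; exact nomatch h
        | some p =>
          obtain ⟨vis', up'⟩ := p
          rw [ha] at h
          rw [ih.1 _ _ _ _ _ ha]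
          exact ih.2 _ _ _ _ _ h

theorem gupGoA_ge {f f' : Nat} (h : f ≤ f') {g vis up c r} (hr : gupGoA f g vis up c = some r) :
    gupGoA f' g vis up c = some r := by
  induction h with
  | refl => exact hr
  | step _ ih => exact (gup_mono _).1 _ _ _ _ _ ih

theorem gupGoL_ge {f f' : Nat} (h : f ≤ f') {g vis up ns r} (hr : gupGoL f g vis up ns = some r) :
    gupGoL f' g vis up ns = some r := by
  induction h with
  | refl => exact hr
  | step _ ih => exact (gup_mono _).2 _ _ _ _ _ ih

theorem gupRunB_mono (f : Nat) :
    ∀ g st vis up r, gupRunB f g st vis up = some r → gupRunB (f + 1) g st vis up = some r := by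
  induction f with
  | zero => intro g st vis up r h; simp [gupRunB] at h
  | succ f ih =>
    intro g st vis up r h
    rcases st with _ | ⟨⟨u, _ | ⟨v, rest⟩⟩, st⟩
    · simpa [gupRunB] using h
    · rw [gupRunB_pop] at h ⊢; exact ih _ _ _ _ _ h
    · cases hc : PySem.Set.contains vis v with
      | true =>
        rw [gupRunB_vis _ _ _ _ _ _ hc] at h ⊢
        exact ih _ _ _ _ _ h
      | false =>
        rw [gupRunB_new _ _ _ _ _ _ hc] at h ⊢
        exact ih _ _ _ _ _ h

theorem gupRunB_ge {f f' : Nat} (h : f ≤ f') {g st vis up r} (hr : gupRunB f g st vis up = some r) :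
    gupRunB f' g st vis up = some r := by
  induction h with
  | refl => exact hr
  | step _ ih => exact gupRunB_mono _ _ _ _ _ _ ih

-- simulation: one A-frame of neighbors = B consuming exactly k steps on its top frame
theorem gup_sim : ∀ f g vis up ns vis' up',
    gupGoL f g vis up ns = some (vis', up') →
    ∃ k, (∀ fb st u, gupRunB (fb + k) g ((u, ns) :: st) vis up = gupRunB fb g st vis' up')
      ∧ k + 2 * up.length ≤ 2 * up'.length + 1 := by
  intro f
  induction f using Nat.strong_induction_on with
  | _ f ihf =>
    intro g vis up ns vis' up' h
    match f, ns with
    | 0, _ => simp [gupGoL] at h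
    | f + 1, [] =>
      simp only [gupGoL, Option.some.injEq, Prod.mk.injEq] at h
      obtain ⟨hv, hu⟩ := h
      subst hv; subst hu
      exact ⟨1, fun fb st u => by rw [show fb + 1 = fb + 1 from rfl, gupRunB_pop], by omega⟩
    | f + 1, v :: rest =>
      simp only [gupGoL] at h
      cases ha : gupGoA f g vis (up ++ [v]) v with
      | none => rw [ha] at h; exact nomatch h
      | some p =>
        obtain ⟨vis₁, up₁⟩ := p
        rw [ha] at h
        obtain ⟨k₂, hk₂, hb₂⟩ := ihf f (by omega) g vis₁ up₁ rest vis' up' h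
        cases f with
        | zero => simp [gupGoA] at ha
        | succ f1 =>
          simp only [gupGoA] at ha
          by_cases hc : PySem.Set.contains vis v = true
          · rw [if_pos hc] at ha
            obtain ⟨h1, h2⟩ := Prod.mk.injEq .. ▸ Option.some.inj ha
            subst h1; subst h2
            refine ⟨k₂ + 1, fun fb st u => ?_, ?_⟩
            · rw [show fb + (k₂ + 1) = (fb + k₂) + 1 by omega, gupRunB_vis _ _ _ _ _ _ hc]
              exact hk₂ fb st u
            · simp only [List.length_append, List.length_cons, List.length_nil] at hb₂
              omega
          · have hcF : PySem.Set.contains vis v = false := by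
              simpa using hc
            rw [if_neg hc] at ha
            cases hl : List.lookup v g with
            | none =>
              rw [hl] at ha
              have ha' : (some (PySem.Set.add vis v, up ++ [v]) :
                  Option (PySem.Set String × List String)) = some (vis₁, up₁) := ha
              obtain ⟨h1, h2⟩ := Prod.mk.injEq .. ▸ Option.some.inj ha'
              subst h1; subst h2
              refine ⟨k₂ + 2, fun fb st u => ?_, ?_⟩
              · rw [show fb + (k₂ + 2) = ((fb + k₂) + 1) + 1 by omega,
                    gupRunB_new _ _ _ _ _ _ hcF, hl]
                simp only [Option.getD_none]
                rw [gupRunB_pop]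
                exact hk₂ fb st u
              · simp only [List.length_append, List.length_cons, List.length_nil] at hb₂
                omega
            | some nsv =>
              rw [hl] at ha
              have ha' : gupGoL f1 g (PySem.Set.add vis v) (up ++ [v]) nsv = some (vis₁, up₁) := ha
              obtain ⟨k₁, hk₁, hb₁⟩ := ihf f1 (by omega) g (PySem.Set.add vis v) (up ++ [v]) nsv vis₁ up₁ ha'
              refine ⟨1 + k₁ + k₂, fun fb st u => ?_, ?_⟩
              · rw [show fb + (1 + k₁ + k₂) = (((fb + k₂) + k₁)) + 1 by omega,
                    gupRunB_new _ _ _ _ _ _ hcF, hl]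
                simp only [Option.getD_some]
                rw [hk₁ (fb + k₂) ((u, rest) :: st) v]
                exact hk₂ fb st u
              · simp only [List.length_append, List.length_cons, List.length_nil] at hb₁
                omega

-- length bound: the upstream list grows by at most 3^fuel
theorem gup_len (f : Nat) :
    (∀ g vis up c vis' up', gupGoA f g vis up c = some (vis', up') → up'.length ≤ up.length + 3 ^ f) ∧
    (∀ g vis up ns vis' up', gupGoL f g vis up ns = some (vis', up') → up'.length ≤ up.length + 3 ^ f) := by
  induction f with
  | zero =>
    refine ⟨fun g vis up c vis' up' h => ?_, fun g vis up ns vis' up' h => ?_⟩ <;>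
      simp [gupGoA, gupGoL] at h
  | succ f ih =>
    have h3 : 3 ^ (f + 1) = 3 ^ f * 3 := pow_succ 3 f
    have h1 : 1 ≤ 3 ^ f := Nat.one_le_pow _ _ (by norm_num)
    refine ⟨fun g vis up c vis' up' h => ?_, fun g vis up ns vis' up' h => ?_⟩
    · simp only [gupGoA] at h
      split_ifs at h with hc
      · obtain ⟨_, h2⟩ := Prod.mk.injEq .. ▸ Option.some.inj h
        subst h2; omega
      · cases hl : List.lookup c g with
        | none =>
          rw [hl] at h
          have h' : (some (PySem.Set.add vis c, up) :
              Option (PySem.Set String × List String)) = some (vis', up') := h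
          obtain ⟨_, h2⟩ := Prod.mk.injEq .. ▸ Option.some.inj h'
          subst h2; omega
        | some ns =>
          rw [hl] at h
          have := ih.2 _ _ _ _ _ _ h
          omega
    · cases ns with
      | nil =>
        simp only [gupGoL, Option.some.injEq, Prod.mk.injEq] at h
        obtain ⟨_, h2⟩ := h
        subst h2; omega
      | cons v rest =>
        simp only [gupGoL] at h
        cases ha : gupGoA f g vis (up ++ [v]) v with
        | none => rw [ha] at h; exact nomatch h
        | some p =>
          obtain ⟨vis₁, up₁⟩ := p
          rw [ha] at h
          have e1 := ih.1 _ _ _ _ _ _ ha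
          have e2 := ih.2 _ _ _ _ _ _ h
          simp only [List.length_append, List.length_cons, List.length_nil] at e1
          omega

-- unvisited-node counting for fuel sufficiency
def gupUnvis (component_id : String) (graph : List (String × List String)) (vis : PySem.Set String) : Nat :=
  ((gupAllN component_id graph).filter (fun x => !(PySem.Set.contains vis x))).length

theorem gup_filter_le {α : Type} (l : List α) (p q : α → Bool) (h : ∀ x, q x = true → p x = true) :
    (l.filter q).length ≤ (l.filter p).length := by
  induction l with
  | nil => simp
  | cons a l ih =>
    simp only [List.filter]
    cases hq : q a with
    | true => rw [h a hq]; simpa using ih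
    | false => cases p a <;> simp <;> omega

theorem gup_filter_lt {α : Type} (l : List α) (p q : α → Bool) (h : ∀ x, q x = true → p x = true)
    (x : α) (hx : x ∈ l) (hpx : p x = true) (hqx : q x = false) :
    (l.filter q).length < (l.filter p).length := by
  induction l with
  | nil => simp at hx
  | cons a l ih =>
    simp only [List.filter]
    rcases List.mem_cons.mp hx with rfl | hx'
    · rw [hqx, hpx]
      have := gup_filter_le l p q h
      simp only [List.length_cons]
      omega
    · cases hq : q a with
      | true =>
        rw [h a hq]
        simpa using ih hx'
      | false =>
        have := ih hx'
        cases p a <;> simp <;> omega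

theorem gupUnvis_le_of_subset {cid : String} {g : List (String × List String)}
    {vis vis' : PySem.Set String}
    (h : ∀ y, PySem.Set.contains vis y = true → PySem.Set.contains vis' y = true) :
    gupUnvis cid g vis' ≤ gupUnvis cid g vis := by
  apply gup_filter_le
  intro x hx
  simp only [Bool.not_eq_true'] at hx ⊢
  cases hv : PySem.Set.contains vis x with
  | false => rfl
  | true => rw [h x hv] at hx; exact hx

theorem gupUnvis_lt_of_add {cid : String} {g : List (String × List String)}
    {vis : PySem.Set String} {x : String} (hx : x ∈ gupAllN cid g)
    (hnx : PySem.Set.contains vis x = false) :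
    gupUnvis cid g (PySem.Set.add vis x) < gupUnvis cid g vis := by
  refine gup_filter_lt _ _ _ ?_ x hx ?_ ?_
  · intro y hy
    simp only [Bool.not_eq_true'] at hy ⊢
    cases hv : PySem.Set.contains vis y with
    | false => rfl
    | true =>
      exfalso
      have hm : y ∈ PySem.Set.add vis x :=
        (PySem.Set.mem_add _ _ _).mpr (Or.inl ((PySem.Set.contains_iff _ _).mp hv))
      rw [(PySem.Set.contains_iff _ _).mpr hm] at hy
      exact Bool.noConfusion hy
  · simp only [Bool.not_eq_true']
    exact hnx
  · simp

theorem gup_lookup_len {g : List (String × List String)} {c : String} {ns : List String}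
    (h : List.lookup c g = some ns) : ns.length ≤ gupMaxLen g := by
  induction g with
  | nil => simp [List.lookup] at h
  | cons p g ih =>
    obtain ⟨a, b⟩ := p
    simp only [List.lookup] at h
    cases hb : (c == a) with
    | true =>
      rw [hb] at h
      have h' : (some b : Option (List String)) = some ns := h
      obtain rfl := Option.some.inj h'
      simp [gupMaxLen]
    | false =>
      rw [hb] at h
      have h' : List.lookup c g = some ns := h
      have := ih h'
      simp only [gupMaxLen, List.foldr] at this ⊢
      omega

theorem gup_lookup_allN {cid : String} {g : List (String × List String)} {c : String}
    {ns : List String} (h : List.lookup c g = some ns) : ∀ v ∈ ns, v ∈ gupAllN cid g := by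
  induction g with
  | nil => simp [List.lookup] at h
  | cons p g ih =>
    obtain ⟨a, b⟩ := p
    simp only [List.lookup] at h
    cases hb : (c == a) with
    | true =>
      rw [hb] at h
      have h' : (some b : Option (List String)) = some ns := h
      obtain rfl := Option.some.inj h'
      intro v hv
      simp only [gupAllN, List.flatMap_cons, List.mem_cons, List.mem_append]
      tauto
    | false =>
      rw [hb] at h
      have h' : List.lookup c g = some ns := h
      intro v hv
      have := ih h' v hv
      simp only [gupAllN, List.flatMap_cons, List.mem_cons, List.mem_append] at this ⊢
      tauto

-- fuel sufficiency for A's traversal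
theorem gup_suf : ∀ u (cid : String) g vis up comp, comp ∈ gupAllN cid g → gupUnvis cid g vis ≤ u →
    ∃ vis' up', gupGoA (u * (gupMaxLen g + 1) + 1) g vis up comp = some (vis', up') ∧
      ∀ y, PySem.Set.contains vis y = true → PySem.Set.contains vis' y = true := by
  intro u
  induction u using Nat.strong_induction_on with
  | _ u ihu =>
    intro cid g vis up comp hcomp hu
    by_cases hc : PySem.Set.contains vis comp = true
    · have hm : comp ∈ vis := (PySem.Set.contains_iff _ _).mp hc
      exact ⟨vis, up, by simp [gupGoA, hm], fun y hy => hy⟩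
    · have hcF : PySem.Set.contains vis comp = false := by simpa using hc
      have hmF : comp ∉ vis := fun hm => by
        rw [(PySem.Set.contains_iff _ _).mpr hm] at hcF
        exact Bool.noConfusion hcF
      have hlt := gupUnvis_lt_of_add (vis := vis) hcomp hcF
      obtain ⟨u', rfl⟩ : ∃ u', u = u' + 1 := ⟨u - 1, by omega⟩
      have hu' : gupUnvis cid g (PySem.Set.add vis comp) ≤ u' := by omega
      have sufL : ∀ ns (vis₂ : PySem.Set String) up₂, (∀ v ∈ ns, v ∈ gupAllN cid g) →
          gupUnvis cid g vis₂ ≤ u' →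
          ∃ vis' up', gupGoL (ns.length + u' * (gupMaxLen g + 1) + 1) g vis₂ up₂ ns
              = some (vis', up') ∧
            ∀ y, PySem.Set.contains vis₂ y = true → PySem.Set.contains vis' y = true := by
        intro ns
        induction ns with
        | nil => exact fun vis₂ up₂ _ _ => ⟨vis₂, up₂, by simp [gupGoL], fun y hy => hy⟩
        | cons v rest ihns =>
          intro vis₂ up₂ hns hv2
          obtain ⟨vis₁, up₁, hgo, hsub₁⟩ :=
            ihu u' (by omega) cid g vis₂ (up₂ ++ [v]) v (hns v (by simp)) hv2
          have hgo' : gupGoA (rest.length + u' * (gupMaxLen g + 1) + 1) g vis₂ (up₂ ++ [v]) v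
              = some (vis₁, up₁) := gupGoA_ge (by omega) hgo
          obtain ⟨vis', up', hgoL, hsub₂⟩ :=
            ihns vis₁ up₁ (fun w hw => hns w (by simp [hw]))
              (le_trans (gupUnvis_le_of_subset hsub₁) hv2)
          refine ⟨vis', up', ?_, fun y hy => hsub₂ y (hsub₁ y hy)⟩
          rw [show (v :: rest).length + u' * (gupMaxLen g + 1) + 1
              = (rest.length + u' * (gupMaxLen g + 1) + 1) + 1 by simp; omega]
          simp only [gupGoL]
          rw [hgo']
          exact hgoL
      have hmul : (u' + 1) * (gupMaxLen g + 1) = u' * (gupMaxLen g + 1) + (gupMaxLen g + 1) := by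
        ring
      cases hl : List.lookup comp g with
      | none =>
        refine ⟨PySem.Set.add vis comp, up, ?_, fun y hy =>
          (PySem.Set.contains_iff _ _).mpr
            ((PySem.Set.mem_add _ _ _).mpr (Or.inl ((PySem.Set.contains_iff _ _).mp hy)))⟩
        simp [gupGoA, hmF, hl]
      | some ns =>
        obtain ⟨vis', up', hgoL, hsub⟩ :=
          sufL ns (PySem.Set.add vis comp) up (gup_lookup_allN hl) hu'
        have hlen := gup_lookup_len hl
        have hgoL' : gupGoL ((u' + 1) * (gupMaxLen g + 1)) g (PySem.Set.add vis comp) up ns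
            = some (vis', up') := gupGoL_ge (by omega) hgoL
        refine ⟨vis', up', ?_, fun y hy => hsub y
          ((PySem.Set.contains_iff _ _).mpr
            ((PySem.Set.mem_add _ _ _).mpr (Or.inl ((PySem.Set.contains_iff _ _).mp hy))))⟩
        simp only [gupGoA]
        rw [if_neg (by rw [hcF]; simp), hl]
        exact hgoL'

-- ===== VERDICT (by name: the statement is the Claim_ definition above) =====
theorem get_upstream_components_py_spec : Claim_equal_get_upstream_components_py := by
  intro cid g _hdom
  unfold Spec_get_upstream_components_py
  have hcid : cid ∈ gupAllN cid g := by simp [gupAllN]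
  have hu : gupUnvis cid g PySem.Set.empty ≤ (gupAllN cid g).length :=
    List.length_filter_le _ _
  obtain ⟨visA, upA, hA, _⟩ :=
    gup_suf ((gupAllN cid g).length) cid g PySem.Set.empty [] cid hcid hu
  have hce : PySem.Set.contains PySem.Set.empty cid = false := rfl
  unfold get_upstream_components_py get_upstream_components_py_alt
  rw [show gupFuelA cid g = (gupAllN cid g).length * (gupMaxLen g + 1) + 1 from rfl, hA]
  simp only [gupGoA] at hA
  rw [if_neg (by rw [hce]; simp)] at hA
  cases hl : List.lookup cid g with
  | none =>
    rw [hl] at hA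
    have hA' : (some (PySem.Set.add PySem.Set.empty cid, []) :
        Option (PySem.Set String × List String)) = some (visA, upA) := hA
    obtain ⟨_, hup⟩ := Prod.mk.injEq .. ▸ Option.some.inj hA'
    rw [show gupFuelB cid g = ((2 * 3 ^ gupFuelA cid g + 1) + 1) + 1 by
      rw [gupFuelB], ← hup]
    rfl
  | some ns =>
    rw [hl] at hA
    have hA' : gupGoL ((gupAllN cid g).length * (gupMaxLen g + 1)) g
        (PySem.Set.add PySem.Set.empty cid) [] ns = some (visA, upA) := hA
    obtain ⟨k, hk, hkb⟩ := gup_sim _ _ _ _ _ _ _ hA'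
    have hrun : gupRunB (1 + k) g [(cid, ns)] (PySem.Set.add PySem.Set.empty cid) [] = some upA := by
      rw [hk 1 [] cid]
      rfl
    have hlen : upA.length ≤ 3 ^ ((gupAllN cid g).length * (gupMaxLen g + 1)) := by
      have := (gup_len _).2 _ _ _ _ _ _ hA'
      simpa using this
    have hpow : 3 ^ ((gupAllN cid g).length * (gupMaxLen g + 1)) ≤ 3 ^ gupFuelA cid g := by
      apply Nat.pow_le_pow_right (by norm_num)
      rw [gupFuelA]
      omega
    have hfb : 1 + k ≤ gupFuelB cid g := by
      rw [gupFuelB]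
      simp only [List.length_nil] at hkb
      omega
    simp only [Option.getD_some]
    rw [gupRunB_ge hfb hrun]
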